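-- pv_equiv track=rewrite | github.com/Guillamoto/TFM-tools | DRG_module.py | BarridoAcoplamientos
-- ===== SOURCE A (Python) =====
-- def BarridoAcoplamientos(sets):
--     sets = list(sets)
--     setsfinales = []
--     while 0 < len(sets):
--         ref = set(sets[0])
--         removed = []
--         for i in sets:
--             if i[0] in ref or i[1] in ref:
--                 ref = ref.union(set(i))
--                 removed.append(i)
--         sets = [e for e in sets if e not in removed]
--         setsfinales.append(ref)
--     return setsfinales
-- ===== SOURCE B (Python) =====
-- def BarridoAcoplamientos(sets):
--     groups = []
--     for i in sets:
--         for g in groups: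
--             if i[0] in g or i[1] in g:
--                 g |= set(i)
--                 break
--         else:
--             groups.append(set(i))
--     return groups
-- ===== Notes on version B (the rewrite author's own statement) =====
-- stated objective: faster
-- what changed: Replaces A's repeated while-loop sweeps (seed ref from the first leftover pair, scan all, then re-filter the list) by a SINGLE forward pass that maintains the ordered list of open groups: each pair joins the first group it touches or opens a new one, so the leftover list and the filtering pass disappear entirely.
-- outside the precondition, e.g. on BarridoAcoplamientos([(0, 1), (3, 4), (1, 3), (3, 4)]): A returns [{0, 1, 3, 4}], B returns [{0, 1, 3, 4}, {3, 4}]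
import Mathlib
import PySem

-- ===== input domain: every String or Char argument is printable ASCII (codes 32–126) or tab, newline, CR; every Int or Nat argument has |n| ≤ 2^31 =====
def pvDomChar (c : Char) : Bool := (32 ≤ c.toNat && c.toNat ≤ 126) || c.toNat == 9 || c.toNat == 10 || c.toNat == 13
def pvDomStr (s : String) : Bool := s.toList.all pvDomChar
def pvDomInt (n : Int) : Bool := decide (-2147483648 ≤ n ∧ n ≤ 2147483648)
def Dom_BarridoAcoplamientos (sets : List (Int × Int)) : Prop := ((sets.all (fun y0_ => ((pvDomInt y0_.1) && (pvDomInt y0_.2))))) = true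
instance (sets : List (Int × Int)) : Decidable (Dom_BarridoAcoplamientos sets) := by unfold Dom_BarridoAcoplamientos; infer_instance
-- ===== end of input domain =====

-- B replaces A's repeated sweeps (seed from first leftover pair, scan, re-filter) with ONE
-- forward pass that keeps the ordered list of open groups; equal output on duplicate-free inputs.

-- ===== PORT A =====
-- body of A's inner 'for i in sets' loop: state (ref, removed)
def stepA (st : PySem.Set Int × List (Int × Int)) (i : Int × Int) :
    PySem.Set Int × List (Int × Int) :=
  if i.1 ∈ st.1 ∨ i.2 ∈ st.1 then
    (PySem.Set.union st.1 (PySem.Set.ofList [i.1, i.2]), st.2 ++ [i])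
  else st

-- removed only grows by appending (needed for loopA's termination, cited in decreasing_by)
theorem stepA_snd_prefix (l : List (Int × Int)) : ∀ (ref : PySem.Set Int) (r : List (Int × Int)),
    (List.foldl stepA (ref, r) l).2 = r ++ (List.foldl stepA (ref, []) l).2 := by
  induction l with
  | nil => intro ref r; simp
  | cons i t ih =>
    intro ref r
    by_cases c : i.1 ∈ ref ∨ i.2 ∈ ref
    · simp only [List.foldl_cons, stepA, if_pos c]
      rw [ih, ih _ ([] ++ [i])]
      simp
    · simp only [List.foldl_cons, stepA, if_neg c]
      exact ih ref r

-- the head pair is always matched, so A's filter strictly shrinks the list (termination of loopA)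
theorem termA (h : Int × Int) (t : List (Int × Int)) :
    ((h :: t).filter
      (fun e => decide (e ∉ (List.foldl stepA (PySem.Set.ofList [h.1, h.2], []) (h :: t)).2))).length
      < (h :: t).length := by
  have hc : h.1 ∈ PySem.Set.ofList [h.1, h.2] ∨ h.2 ∈ PySem.Set.ofList [h.1, h.2] := by
    left; simp [PySem.Set.mem_ofList]
  have hmem : h ∈ (List.foldl stepA (PySem.Set.ofList [h.1, h.2], []) (h :: t)).2 := by
    simp only [List.foldl_cons, stepA, if_pos hc]
    rw [stepA_snd_prefix]
    simp
  rw [List.filter_cons]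
  simp only [hmem, not_true_eq_false, decide_false, if_neg (Bool.false_ne_true)]
  calc (List.filter _ t).length ≤ t.length := List.length_filter_le _ t
    _ < (h :: t).length := by simp

-- A: while-loop; each round folds the scan, then filters out removed pairs by membership
def loopA : List (Int × Int) → List (List Int)
  | [] => []
  | h :: t =>
    let p := List.foldl stepA (PySem.Set.ofList [h.1, h.2], []) (h :: t)
    p.1 :: loopA ((h :: t).filter (fun e => decide (e ∉ p.2)))
termination_by l => l.length
decreasing_by exact termA h t

def BarridoAcoplamientos (sets : List (Int × Int)) : List (List Int) := loopA sets

-- ===== PORT B =====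
-- B's inner 'for g in groups … else append' loop: the pair joins the first group it touches
-- (union in place, break) or opens a new group at the end
def insertPair : List (PySem.Set Int) → Int × Int → List (PySem.Set Int)
  | [], i => [PySem.Set.ofList [i.1, i.2]]
  | g :: gs, i =>
    if i.1 ∈ g ∨ i.2 ∈ g then PySem.Set.union g (PySem.Set.ofList [i.1, i.2]) :: gs
    else g :: insertPair gs i

-- B: one pass over sets, folding each pair into the ordered group list
def BarridoAcoplamientos_alt (sets : List (Int × Int)) : List (List Int) :=
  List.foldl insertPair [] sets

-- ===== PRECONDITION & SPEC =====
-- Pre_ excludes lists with duplicate pairs, on which A's filter-by-value pass also deletes an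
-- UNMATCHED earlier copy of a pair whose later copy matched — an accident of `e not in removed`;
-- B keeps that copy for a later group.
def Pre_BarridoAcoplamientos (sets : List (Int × Int)) : Prop := sets.Nodup
instance (sets : List (Int × Int)) : Decidable (Pre_BarridoAcoplamientos sets) := by
  unfold Pre_BarridoAcoplamientos; infer_instance

def pvWitness_BarridoAcoplamientos : (List (Int × Int)) := [(1, 2), (2, 3), (5, 6)]

def Spec_BarridoAcoplamientos (sets : List (Int × Int)) (out : List (List Int)) : Prop :=
  out = BarridoAcoplamientos_alt sets
instance (sets : List (Int × Int)) (out : List (List Int)) :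
    Decidable (Spec_BarridoAcoplamientos sets out) := by
  unfold Spec_BarridoAcoplamientos; infer_instance

-- ===== CLAIM (what is proved, stated in full; the proofs are below) =====
def Claim_equal_BarridoAcoplamientos : Prop :=
  ∀ (sets : List (Int × Int)), Dom_BarridoAcoplamientos sets →
    Pre_BarridoAcoplamientos sets → Spec_BarridoAcoplamientos sets (BarridoAcoplamientos sets)

-- ===== LEMMAS AND PROOFS =====

-- proof-side intermediate form of a round: one scan keeping (ref, leftover) directly
def stepB (st : PySem.Set Int × List (Int × Int)) (i : Int × Int) :
    PySem.Set Int × List (Int × Int) :=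
  if i.1 ∈ st.1 ∨ i.2 ∈ st.1 then
    (PySem.Set.union st.1 (PySem.Set.ofList [i.1, i.2]), st.2)
  else (st.1, st.2 ++ [i])

theorem stepB_snd_len (l : List (Int × Int)) : ∀ (ref : PySem.Set Int) (r : List (Int × Int)),
    (List.foldl stepB (ref, r) l).2.length ≤ r.length + l.length := by
  induction l with
  | nil => intro ref r; simp
  | cons i t ih =>
    intro ref r
    by_cases c : i.1 ∈ ref ∨ i.2 ∈ ref
    · simp only [List.foldl_cons, stepB, if_pos c]
      calc (List.foldl stepB (_, r) t).2.length ≤ r.length + t.length := ih _ r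
        _ ≤ r.length + (i :: t).length := by simp
    · simp only [List.foldl_cons, stepB, if_neg c]
      calc (List.foldl stepB (ref, r ++ [i]) t).2.length
          ≤ (r ++ [i]).length + t.length := ih ref _
        _ = r.length + (i :: t).length := by simp; omega

theorem termB (h : Int × Int) (t : List (Int × Int)) :
    (List.foldl stepB (PySem.Set.ofList [h.1, h.2], []) (h :: t)).2.length < (h :: t).length := by
  have hc : h.1 ∈ PySem.Set.ofList [h.1, h.2] ∨ h.2 ∈ PySem.Set.ofList [h.1, h.2] := by
    left; simp [PySem.Set.mem_ofList]
  simp only [List.foldl_cons, stepB, if_pos hc]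
  calc (List.foldl stepB (_, ([] : List (Int × Int))) t).2.length
      ≤ ([] : List (Int × Int)).length + t.length := stepB_snd_len t _ _
    _ < (h :: t).length := by simp

def loopB : List (Int × Int) → List (List Int)
  | [] => []
  | h :: t =>
    let p := List.foldl stepB (PySem.Set.ofList [h.1, h.2], []) (h :: t)
    p.1 :: loopB p.2
termination_by l => l.length
decreasing_by exact termB h t

-- the ref component evolves identically in both round-scans, independent of the list component
theorem fst_eq (l : List (Int × Int)) :
    ∀ (ref : PySem.Set Int) (r s : List (Int × Int)),
      (List.foldl stepA (ref, r) l).1 = (List.foldl stepB (ref, s) l).1 := by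
  induction l with
  | nil => intro ref r s; rfl
  | cons i t ih =>
    intro ref r s
    by_cases c : i.1 ∈ ref ∨ i.2 ∈ ref
    · simp only [List.foldl_cons, stepA, stepB, if_pos c]; exact ih _ _ _
    · simp only [List.foldl_cons, stepA, stepB, if_neg c]; exact ih _ _ _

-- everything A's scan collects in removed comes from the scanned list
theorem subsetA (l : List (Int × Int)) :
    ∀ (ref : PySem.Set Int) (r : List (Int × Int)) (x : Int × Int),
      x ∈ (List.foldl stepA (ref, r) l).2 → x ∈ r ∨ x ∈ l := by
  induction l with
  | nil => intro ref r x hx; left; simpa using hx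
  | cons i t ih =>
    intro ref r x hx
    by_cases c : i.1 ∈ ref ∨ i.2 ∈ ref
    · simp only [List.foldl_cons, stepA, if_pos c] at hx
      rcases ih _ _ _ hx with h | h
      · rcases List.mem_append.1 h with h | h
        · exact Or.inl h
        · right; simp at h; simp [h]
      · right; simp [h]
    · simp only [List.foldl_cons, stepA, if_neg c] at hx
      rcases ih _ _ _ hx with h | h
      · exact Or.inl h
      · right; simp [h]

-- leftover grows only by appending
theorem stepB_snd_prefix (l : List (Int × Int)) :
    ∀ (ref : PySem.Set Int) (r : List (Int × Int)),
      (List.foldl stepB (ref, r) l).2 = r ++ (List.foldl stepB (ref, []) l).2 := by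
  induction l with
  | nil => intro ref r; simp
  | cons i t ih =>
    intro ref r
    by_cases c : i.1 ∈ ref ∨ i.2 ∈ ref
    · simp only [List.foldl_cons, stepB, if_pos c]; exact ih _ r
    · simp only [List.foldl_cons, stepB, if_neg c]
      rw [ih _ (r ++ [i]), ih _ ([] ++ [i])]
      simp

-- A's post-scan filter equals the directly-collected leftover, on a duplicate-free list
theorem pass_eq (l : List (Int × Int)) :
    ∀ (ref : PySem.Set Int), l.Nodup →
      l.filter (fun e => decide (e ∉ (List.foldl stepA (ref, []) l).2))
        = (List.foldl stepB (ref, []) l).2 := by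
  induction l with
  | nil => intro ref _; rfl
  | cons i t ih =>
    intro ref hnd
    have hit : i ∉ t := (List.nodup_cons.1 hnd).1
    have hndt : t.Nodup := (List.nodup_cons.1 hnd).2
    by_cases c : i.1 ∈ ref ∨ i.2 ∈ ref
    · simp only [List.foldl_cons, stepA, stepB, if_pos c]
      rw [stepA_snd_prefix]
      rw [List.filter_cons]
      rw [show (decide (i ∉ ([] ++ [i]) ++ (List.foldl stepA
            (PySem.Set.union ref (PySem.Set.ofList [i.1, i.2]), []) t).2)) = false by simp]
      simp only [if_neg (Bool.false_ne_true)]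
      rw [← ih _ hndt]
      apply List.filter_congr
      intro x hx
      have hxi : x ≠ i := fun h => hit (h ▸ hx)
      simp [hxi]
    · simp only [List.foldl_cons, stepA, stepB, if_neg c]
      rw [stepB_snd_prefix]
      rw [List.filter_cons]
      have hni : i ∉ (List.foldl stepA (ref, []) t).2 := by
        intro hmem
        rcases subsetA t ref [] i hmem with h | h
        · simp at h
        · exact hit h
      simp only [hni, not_false_eq_true, decide_true, if_true]
      rw [ih _ hndt]
      simp

-- A's while-loop equals the round-wise leftover loop on duplicate-free lists
theorem loopA_eq_loopB : ∀ (n : ℕ) (l : List (Int × Int)), l.length ≤ n → l.Nodup →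
    loopA l = loopB l := by
  intro n
  induction n with
  | zero =>
    intro l hl _
    have : l = [] := List.eq_nil_of_length_eq_zero (Nat.le_zero.1 hl)
    subst this; rw [loopA, loopB]
  | succ n ih =>
    intro l hl hnd
    match l with
    | [] => rw [loopA, loopB]
    | h :: t =>
      rw [loopA, loopB]
      have hfst := fst_eq (h :: t) (PySem.Set.ofList [h.1, h.2]) [] []
      have hpass := pass_eq (h :: t) (PySem.Set.ofList [h.1, h.2]) hnd
      have hlen : ((h :: t).filter
          (fun e => decide (e ∉ (List.foldl stepA (PySem.Set.ofList [h.1, h.2], []) (h :: t)).2))).length ≤ n := by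
        have := termA h t
        simp only [List.length_cons] at this hl
        omega
      have hndf : ((h :: t).filter
          (fun e => decide (e ∉ (List.foldl stepA (PySem.Set.ofList [h.1, h.2], []) (h :: t)).2))).Nodup :=
        hnd.filter _
      have hrec := ih _ hlen hndf
      simp only [hfst, hpass] at hrec ⊢
      rw [hrec]

-- the ref component of a round-scan does not depend on the leftover accumulator
theorem stepB_fst_indep (l : List (Int × Int)) :
    ∀ (ref : PySem.Set Int) (r s : List (Int × Int)),
      (List.foldl stepB (ref, r) l).1 = (List.foldl stepB (ref, s) l).1 := by
  induction l with
  | nil => intro ref r s; rfl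
  | cons i t ih =>
    intro ref r s
    by_cases c : i.1 ∈ ref ∨ i.2 ∈ ref
    · simp only [List.foldl_cons, stepB, if_pos c]; exact ih _ _ _
    · simp only [List.foldl_cons, stepB, if_neg c]; exact ih _ _ _

-- KEY: pushing a whole list through the one-pass insertion with a leading open group g is the
-- same as finishing g by a round-scan and then pushing the leftovers into the remaining groups
theorem insert_fold (l : List (Int × Int)) :
    ∀ (g : PySem.Set Int) (gs : List (PySem.Set Int)),
      List.foldl insertPair (g :: gs) l
        = (List.foldl stepB (g, []) l).1
            :: List.foldl insertPair gs (List.foldl stepB (g, []) l).2 := by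
  induction l with
  | nil => intro g gs; rfl
  | cons i t ih =>
    intro g gs
    by_cases c : i.1 ∈ g ∨ i.2 ∈ g
    · simp only [List.foldl_cons, insertPair, stepB, if_pos c]
      exact ih _ gs
    · simp only [List.foldl_cons, insertPair, stepB, if_neg c]
      rw [ih g (insertPair gs i)]
      rw [stepB_snd_prefix t g ([] ++ [i])]
      rw [stepB_fst_indep t g ([] ++ [i]) []]
      simp

-- seeding: the seed set absorbs its own pair without change
theorem union_seed_self (a b : Int) :
    PySem.Set.union (PySem.Set.ofList [a, b]) (PySem.Set.ofList [a, b])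
      = PySem.Set.ofList [a, b] := by
  by_cases hab : a = b
  · simp [PySem.Set.ofList, PySem.Set.union, PySem.Set.update,
      PySem.Set.add, PySem.Set.contains, PySem.Set.empty, hab]
  · have hba : ¬ b = a := fun h => hab h.symm
    simp [PySem.Set.ofList, PySem.Set.union, PySem.Set.update,
      PySem.Set.add, PySem.Set.contains, PySem.Set.empty, hab, hba]

-- the round-wise leftover loop equals B's single pass (no Nodup needed)
theorem loopB_eq_alt : ∀ (n : ℕ) (l : List (Int × Int)), l.length ≤ n →
    loopB l = List.foldl insertPair [] l := by
  intro n
  induction n with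
  | zero =>
    intro l hl
    have : l = [] := List.eq_nil_of_length_eq_zero (Nat.le_zero.1 hl)
    subst this; rw [loopB]; rfl
  | succ n ih =>
    intro l hl
    match l with
    | [] => rw [loopB]; rfl
    | h :: t =>
      rw [loopB]
      have hseed : stepB (PySem.Set.ofList [h.1, h.2], []) h
          = (PySem.Set.ofList [h.1, h.2], []) := by
        have hc : h.1 ∈ PySem.Set.ofList [h.1, h.2] ∨ h.2 ∈ PySem.Set.ofList [h.1, h.2] := by
          left; simp [PySem.Set.mem_ofList]
        simp only [stepB, if_pos hc, union_seed_self]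
      have hrw : List.foldl stepB (PySem.Set.ofList [h.1, h.2], []) (h :: t)
          = List.foldl stepB (PySem.Set.ofList [h.1, h.2], []) t := by
        rw [List.foldl_cons, hseed]
      have hlen : (List.foldl stepB (PySem.Set.ofList [h.1, h.2], []) t).2.length ≤ n := by
        have := stepB_snd_len t (PySem.Set.ofList [h.1, h.2]) []
        simp only [List.length_nil, Nat.zero_add] at this
        simp only [List.length_cons] at hl
        omega
      have hrec := ih _ hlen
      show (List.foldl stepB (PySem.Set.ofList [h.1, h.2], []) (h :: t)).1
          :: loopB (List.foldl stepB (PySem.Set.ofList [h.1, h.2], []) (h :: t)).2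
          = List.foldl insertPair [] (h :: t)
      rw [hrw, hrec]
      rw [show List.foldl insertPair [] (h :: t)
            = List.foldl insertPair [PySem.Set.ofList [h.1, h.2]] t from rfl]
      rw [insert_fold t (PySem.Set.ofList [h.1, h.2]) []]

-- ===== VERDICT (by name: the statement is the Claim_ definition above) =====
theorem BarridoAcoplamientos_spec : Claim_equal_BarridoAcoplamientos := by
  intro sets _ hpre
  unfold Spec_BarridoAcoplamientos BarridoAcoplamientos BarridoAcoplamientos_alt
  rw [loopA_eq_loopB sets.length sets le_rfl hpre]
  exact loopB_eq_alt sets.length sets le_rfl
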